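-- pv_equiv track=rewrite | github.com/thisisouvik/h4b_dna_repo | backend/app/utils/dna_encoder.py | binary_to_dna
-- ===== SOURCE A (Python) =====
-- def binary_to_dna(binary: str) -> str:
--     """Convert binary string to DNA sequence using 4-bit encoding."""
--     mapping = {
--         '0000': 'A',
--         '0001': 'T',
--         '0010': 'C',
--         '0011': 'G',
--         '0100': 'AA',
--         '0101': 'AT',
--         '0110': 'AC',
--         '0111': 'AG',
--         '1000': 'TA',
--         '1001': 'TT',
--         '1010': 'TC',
--         '1011': 'TG',
--         '1100': 'CA',
--         '1101': 'CT',
--         '1110': 'CC',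
--         '1111': 'CG'
--     }
--
--     # Pad binary string to be divisible by 4
--     padding = (4 - len(binary) % 4) % 4
--     binary += '0' * padding
--
--     # Convert binary to DNA
--     dna = ''
--     for i in range(0, len(binary), 4):
--         dna += mapping[binary[i:i+4]]
--
--     return dna
-- ===== SOURCE B (Python) =====
-- # Same 4-bit encoding built from two 2-bit tables (low pair ATCG, high pair
-- # prefix A/T/C), consuming the padded bit string chunk by chunk instead of
-- # indexing a 16-entry dict over a range loop.
-- LO = {'00': 'A', '01': 'T', '10': 'C', '11': 'G'}
-- HI = {'01': 'A', '10': 'T', '11': 'C'}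
--
--
-- def binary_to_dna(binary: str) -> str:
--     bits = binary + '0' * (-len(binary) % 4)
--     out = []
--     while bits:
--         chunk, bits = bits[:4], bits[4:]
--         hi, lo = chunk[:2], chunk[2:]
--         out.append(LO[lo] if hi == '00' else HI[hi] + LO[lo])
--     return ''.join(out)
-- ===== Notes on version B (the rewrite author's own statement) =====
-- stated objective: simpler
-- what changed: Replaces the 16-entry 4-bit dict and the index/range loop with two 2-bit tables (low pair and high-pair prefix) applied while destructuring the padded bit string chunk by chunk into a joined list.
import Mathlib
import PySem

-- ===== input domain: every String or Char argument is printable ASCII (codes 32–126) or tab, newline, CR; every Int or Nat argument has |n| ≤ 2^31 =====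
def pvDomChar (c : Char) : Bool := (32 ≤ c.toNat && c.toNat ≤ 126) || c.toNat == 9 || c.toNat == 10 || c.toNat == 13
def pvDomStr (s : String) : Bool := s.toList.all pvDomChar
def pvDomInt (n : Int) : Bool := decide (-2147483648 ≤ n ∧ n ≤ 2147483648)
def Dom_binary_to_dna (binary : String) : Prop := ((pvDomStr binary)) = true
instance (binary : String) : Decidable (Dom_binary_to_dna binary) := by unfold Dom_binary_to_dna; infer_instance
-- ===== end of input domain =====

-- B replaces A's 16-entry 4-bit dict and index/range loop by two 2-bit tables applied
-- while destructuring the padded bit string chunk by chunk (objective: simpler).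

-- ===== PORT A =====
-- A's 16-entry dict literal (strings ported as their char lists)
def aMapping : PySem.Dict (List Char) (List Char) :=
  PySem.Dict.ofList
    [ (['0','0','0','0'], ['A']), (['0','0','0','1'], ['T'])
    , (['0','0','1','0'], ['C']), (['0','0','1','1'], ['G'])
    , (['0','1','0','0'], ['A','A']), (['0','1','0','1'], ['A','T'])
    , (['0','1','1','0'], ['A','C']), (['0','1','1','1'], ['A','G'])
    , (['1','0','0','0'], ['T','A']), (['1','0','0','1'], ['T','T'])
    , (['1','0','1','0'], ['T','C']), (['1','0','1','1'], ['T','G'])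
    , (['1','1','0','0'], ['C','A']), (['1','1','0','1'], ['C','T'])
    , (['1','1','1','0'], ['C','C']), (['1','1','1','1'], ['C','G']) ]

-- mapping[...] raises KeyError on a missing key; Pre_ excludes those inputs, the default [] is never used there
def binary_to_dna (binary : String) : String :=
  let padding : Int := PySem.Int.mod (4 - PySem.Int.mod (PySem.Str.len binary) 4) 4
  let b : List Char := binary.toList ++ List.replicate padding.toNat '0'
  let dna : List Char :=
    (PySem.List.pyRange 0 (b.length : Int) 4).foldl
      (fun dna i => dna ++ aMapping.getD (PySem.List.slice b (some i) (some (i + 4))) []) []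
  String.ofList dna

-- ===== PORT B =====
def loD : PySem.Dict (List Char) (List Char) :=
  PySem.Dict.ofList [(['0','0'], ['A']), (['0','1'], ['T']), (['1','0'], ['C']), (['1','1'], ['G'])]
def hiD : PySem.Dict (List Char) (List Char) :=
  PySem.Dict.ofList [(['0','1'], ['A']), (['1','0'], ['T']), (['1','1'], ['C'])]

-- 'while bits: chunk, bits = bits[:4], bits[4:]' — bits[:4]/bits[4:] are take 4/drop 4
-- (PySem.List.slice_to_natCast / slice_from_natCast); each loop body appends one piece to out
def altGo : List Char → List (List Char)
  | [] => []
  | b :: rest =>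
    let chunk := (b :: rest).take 4
    let hi := chunk.take 2
    let lo := chunk.drop 2
    (if hi = ['0','0'] then loD.getD lo [] else hiD.getD hi [] ++ loD.getD lo [])
      :: altGo ((b :: rest).drop 4)
  termination_by bits => bits.length
  decreasing_by simp

def binary_to_dna_alt (binary : String) : String :=
  let bits : List Char :=
    binary.toList ++ List.replicate (PySem.Int.mod (-(PySem.Str.len binary)) 4).toNat '0'
  String.ofList (PySem.Chars.join [] (altGo bits))

-- ===== PRECONDITION & SPEC =====
-- Pre_ excludes strings containing a non-binary character: there A raises KeyError (and B does too).
def Pre_binary_to_dna (binary : String) : Prop := (binary.toList.all (fun c => c = '0' || c = '1')) = true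
instance (binary : String) : Decidable (Pre_binary_to_dna binary) := by unfold Pre_binary_to_dna; infer_instance
def pvWitness_binary_to_dna : String := "0110"

def Spec_binary_to_dna (binary : String) (out : String) : Prop := out = binary_to_dna_alt binary
instance (binary : String) (out : String) : Decidable (Spec_binary_to_dna binary out) := by unfold Spec_binary_to_dna; infer_instance

-- ===== CLAIM (what is proved, stated in full; the proofs are below) =====
def Claim_equal_binary_to_dna : Prop := ∀ (binary : String), Dom_binary_to_dna binary → Pre_binary_to_dna binary → Spec_binary_to_dna binary (binary_to_dna binary)

-- ===== LEMMAS AND PROOFS =====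

-- step-4 range peels its first element
lemma pyRange4_cons (a b : Int) (h : a < b) :
    PySem.List.pyRange a b 4 = a :: PySem.List.pyRange (a + 4) b 4 := by
  rw [PySem.List.pyRange_of_pos a b (by norm_num), PySem.List.pyRange_of_pos (a + 4) b (by norm_num)]
  by_cases h4 : a + 4 < b
  · have hc : ((b - a + 4 - 1) / 4).toNat = ((b - (a + 4) + 4 - 1) / 4).toNat + 1 := by omega
    simp only [if_pos h, if_pos h4, hc, List.range_succ_eq_map, List.map_cons, List.map_map]
    refine List.cons_eq_cons.mpr ⟨by push_cast; ring, ?_⟩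
    apply List.map_congr_left
    intro k _
    simp only [Function.comp_apply]; push_cast; ring
  · have hc : ((b - a + 4 - 1) / 4).toNat = 1 := by omega
    simp [if_pos h, if_neg h4, hc]

-- one 4-bit chunk: A's 16-entry lookup agrees with B's two 2-bit lookups
lemma chunk_eq (c0 c1 c2 c3 : Char)
    (h0 : c0 = '0' ∨ c0 = '1') (h1 : c1 = '0' ∨ c1 = '1')
    (h2 : c2 = '0' ∨ c2 = '1') (h3 : c3 = '0' ∨ c3 = '1') :
    aMapping.getD [c0, c1, c2, c3] []
      = (if [c0, c1] = ['0','0'] then loD.getD [c2, c3] []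
         else hiD.getD [c0, c1] [] ++ loD.getD [c2, c3] []) := by
  rcases h0 with rfl | rfl <;> rcases h1 with rfl | rfl <;>
    rcases h2 with rfl | rfl <;> rcases h3 with rfl | rfl <;> decide

lemma altGo_nil : altGo [] = [] := by
  rw [altGo.eq_def]

lemma altGo_cons (b : Char) (rest : List Char) :
    altGo (b :: rest)
      = (if ((b :: rest).take 4).take 2 = ['0','0']
         then loD.getD (((b :: rest).take 4).drop 2) []
         else hiD.getD (((b :: rest).take 4).take 2) [] ++ loD.getD (((b :: rest).take 4).drop 2) [])
        :: altGo ((b :: rest).drop 4) := by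
  conv_lhs => rw [altGo.eq_def]

-- ''.join over the list of pieces is concatenation
lemma join_nil_sep (l : List (List Char)) : PySem.Chars.join [] l = l.flatten := by
  induction l with
  | nil => simp [PySem.Chars.join_nil]
  | cons h t ih =>
    cases t with
    | nil => simp [PySem.Chars.join_singleton]
    | cons b t' => rw [PySem.Chars.join_cons_cons]; simp_all

lemma main_chunks : ∀ (n : ℕ) (pre l : List Char), l.length = 4 * n →
    (∀ c ∈ l, c = '0' ∨ c = '1') →
    (PySem.List.pyRange (pre.length : Int) ((pre.length : Int) + (4 * n : ℕ)) 4).flatMap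
        (fun i => aMapping.getD (PySem.List.slice (pre ++ l) (some i) (some (i + 4))) [])
      = (altGo l).flatten := by
  intro n
  induction n with
  | zero =>
    intro pre l hlen _
    have hl : l = [] := List.eq_nil_of_length_eq_zero (by omega)
    subst hl
    rw [PySem.List.pyRange_of_pos _ _ (by norm_num), altGo_nil]
    simp
  | succ n ih =>
    intro pre l hlen hbin
    match l, hlen with
    | c0 :: c1 :: c2 :: c3 :: rest, hlen =>
      have hrest : rest.length = 4 * n := by simp at hlen; omega
      have hlt : (pre.length : Int) < (pre.length : Int) + (4 * (n + 1) : ℕ) := by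
        push_cast; omega
      rw [pyRange4_cons _ _ hlt, List.flatMap_cons]
      have hslice : PySem.List.slice (pre ++ c0 :: c1 :: c2 :: c3 :: rest)
          (some (pre.length : Int)) (some ((pre.length : Int) + 4)) = [c0, c1, c2, c3] := by
        have h := PySem.List.slice_natCast_add (pre ++ c0 :: c1 :: c2 :: c3 :: rest) pre.length 4
        rw [show ((pre.length : Int) + ((4 : ℕ) : Int)) = (pre.length : Int) + 4 by norm_num] at h
        rw [h, List.drop_left]
        rfl
      have htail :
          (PySem.List.pyRange ((pre.length : Int) + 4) ((pre.length : Int) + (4 * (n + 1) : ℕ)) 4).flatMap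
              (fun i => aMapping.getD (PySem.List.slice (pre ++ c0 :: c1 :: c2 :: c3 :: rest) (some i) (some (i + 4))) [])
            = (altGo rest).flatten := by
        have h1 : pre ++ c0 :: c1 :: c2 :: c3 :: rest = (pre ++ [c0, c1, c2, c3]) ++ rest := by
          simp
        have h2 : ((pre.length : Int) + 4) = (((pre ++ [c0, c1, c2, c3]).length : ℕ) : Int) := by
          simp only [List.length_append, List.length_cons, List.length_nil]
          push_cast; ring
        have h3 : ((pre.length : Int) + (4 * (n + 1) : ℕ))
            = (((pre ++ [c0, c1, c2, c3]).length : ℕ) : Int) + ((4 * n : ℕ) : Int) := by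
          simp only [List.length_append, List.length_cons, List.length_nil]
          push_cast; ring
        rw [h1, h2, h3]
        exact ih (pre ++ [c0, c1, c2, c3]) rest hrest
          (fun c hc => hbin c (by simp [hc]))
      rw [hslice, htail]
      have hhead := chunk_eq c0 c1 c2 c3 (hbin c0 (by simp)) (hbin c1 (by simp))
        (hbin c2 (by simp)) (hbin c3 (by simp))
      rw [hhead, altGo_cons, List.flatten_cons]
      simp

-- the two paddings agree
lemma pad_eq (m : ℕ) :
    PySem.Int.mod (4 - PySem.Int.mod (m : Int) 4) 4 = PySem.Int.mod (-(m : Int)) 4 := by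
  rw [PySem.Int.mod_eq_emod_of_pos (by norm_num), PySem.Int.mod_eq_emod_of_pos (by norm_num),
    PySem.Int.mod_eq_emod_of_pos (by norm_num)]
  omega

-- ===== VERDICT (by name: the statement is the Claim_ definition above) =====
theorem binary_to_dna_spec : Claim_equal_binary_to_dna := by
  intro binary _ hpre
  unfold Spec_binary_to_dna binary_to_dna binary_to_dna_alt
  simp only [PySem.Str.len_eq, pad_eq]
  refine congrArg String.ofList ?_
  set pad : ℕ := (PySem.Int.mod (-(binary.toList.length : Int)) 4).toNat with hpad
  set bits : List Char := binary.toList ++ List.replicate pad '0' with hbits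
  rw [join_nil_sep, PySem.List.foldl_append_eq_flatMap, List.nil_append]
  have h1 : PySem.Int.mod (-(binary.toList.length : Int)) 4
      = (-(binary.toList.length : Int)) % 4 := PySem.Int.mod_eq_emod_of_pos (by norm_num)
  have hmod : (binary.toList.length + pad) % 4 = 0 := by
    rw [hpad, h1]; omega
  have hlen : bits.length = 4 * ((binary.toList.length + pad) / 4) := by
    rw [hbits]
    simp only [List.length_append, List.length_replicate]
    omega
  have hbin : ∀ c ∈ bits, c = '0' ∨ c = '1' := by
    intro c hc
    rcases List.mem_append.mp (hbits ▸ hc) with h | h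
    · simpa using List.all_eq_true.mp hpre c h
    · left; exact List.eq_of_mem_replicate h
  have hm := main_chunks ((binary.toList.length + pad) / 4) [] bits hlen hbin
  simp only [List.length_nil, Nat.cast_zero, zero_add, List.nil_append] at hm
  rw [show ((bits.length : ℕ) : Int) = ((4 * ((binary.toList.length + pad) / 4) : ℕ) : Int)
    from by exact_mod_cast hlen]
  exact hm
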